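-- pv_equiv track=rewrite | github.com/daeni-dang/2021-1-OSSP1-Hayan.zip-1 | hayanzip/app/views.py | tense_to_flag
-- ===== SOURCE A (Python) =====
-- def find_tense(sentence):
--     tense_table = [['past', ], ['present', ], ['future', ]] # 문자열과 시제를 함께 저장할 테이블
--     # ____________________________
--     # | past(0행)   |  문장  |  ...
--     # | __________________________
--     # | present(1행)|  문장  |  ...
--     # | __________________________
--     # | future(2행) |  문장  |  ...
--     # | __________________________
--
--     special_future = 0  # '것','이'를 처리하기 위한 변수
--     is_present_flag = True # 현재시제 판단 위한 변수
--     for i in range(len(sentence)):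
--         # 미래시제 1: '것''이'
--         if sentence[i][1].find('NNB') != -1:
--             special_future = special_future + 1  # NNB 는 '것'이므로 ++함
--         if sentence[i][1].find('VCP') != -1:
--             special_future = special_future + 1  # VCP 는 '이'이므로 ++함
--         if special_future == 2:  # '것'과 '이'가 모두 존재하면 미래 시제로 판단
--             tense_table[2].append(sentence)
--             is_present_flag = False
--             break
--         # 높임 표현(시, 십, 세, 심, 실)의 경우 처리
--         if sentence[i][1].find('EP') != -1 \
--                 and not sentence[i][0].find('시') != -1 \
--                 and not sentence[i][0].find('십') != -1 \
--                 and not sentence[i][0].find('세') != -1 \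
--                 and not sentence[i][0].find('실') != -1 \
--                 and not sentence[i][0].find('심') != -1:
--             # 미래시제 2: '겠'
--             if sentence[i][0].find('겠') != -1:
--                 tense_table[2].append(sentence)
--                 is_present_flag = False
--             # 과거시제
--             else:
--                 tense_table[0].append(sentence)
--                 is_present_flag = False
--             break
--     # 현재시제
--     if is_present_flag == True:
--         tense_table[1].append(sentence)
--     return tense_table
--
-- def tense_to_flag(sentence):
--     # past    : 0
--     # present : 1
--     # future  : 2
--     tense_table = find_tense(sentence)
--     tense_flag = []
--     for i in range(len(tense_table)):
--         # 길이가 2 이상이어야 문장이 있는 것임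
--         if len(tense_table[i]) > 1:
--             if tense_table[i][0] == 'past':
--                 tense_flag.append(0)
--             elif tense_table[i][0] == 'future':
--                 tense_flag.append(2)
--             else:
--                 tense_flag.append(1)
--     return tense_flag
-- ===== SOURCE B (Python) =====
-- def _first_future(sentence):
--     # earliest index at which the running NNB/VCP count is exactly 2, else None
--     total = 0
--     for i, tok in enumerate(sentence):
--         total += ('NNB' in tok[1]) + ('VCP' in tok[1])
--         if total == 2:
--             return i
--     return None
--
--
-- def _first_ep(sentence):
--     # earliest non-honorific EP token, as (index, word), else None
--     for i, tok in enumerate(sentence):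
--         if 'EP' in tok[1] and not any(h in tok[0] for h in ('시', '십', '세', '실', '심')):
--             return i, tok[0]
--     return None
--
--
-- def tense_to_flag(sentence):
--     # Two independent searches, combined by comparing where each would decide.
--     f = _first_future(sentence)
--     e = _first_ep(sentence)
--     if f is not None and (e is None or f <= e[0]):
--         return [2]
--     if e is not None:
--         return [2] if '겠' in e[1] else [0]
--     return [1]
-- ===== Notes on version B (the rewrite author's own statement) =====
-- stated objective: alternative
-- what changed: B replaces A's single stateful scan that fills a tense_table and decodes it by two independent searches - the earliest index where the running NNB/VCP count reaches exactly 2 and the earliest non-honorific EP token - whose indices are then compared to pick the flag directly.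
-- outside the precondition, e.g. on tense_to_flag([['a', 'NNB'], ['b', 'VCP'], ['c']]): A returns [2], B raises IndexError
import Mathlib
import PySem

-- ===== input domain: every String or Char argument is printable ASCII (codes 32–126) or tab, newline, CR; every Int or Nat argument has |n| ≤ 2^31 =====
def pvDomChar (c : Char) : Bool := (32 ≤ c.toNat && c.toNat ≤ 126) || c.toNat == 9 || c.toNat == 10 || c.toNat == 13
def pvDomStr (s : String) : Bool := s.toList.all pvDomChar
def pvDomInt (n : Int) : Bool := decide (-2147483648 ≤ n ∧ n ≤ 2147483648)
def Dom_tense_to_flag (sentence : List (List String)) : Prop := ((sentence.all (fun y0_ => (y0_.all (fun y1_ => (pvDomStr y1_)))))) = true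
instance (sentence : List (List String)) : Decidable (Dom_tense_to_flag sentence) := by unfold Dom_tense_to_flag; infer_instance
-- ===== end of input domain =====

-- B replaces A's stateful scan + tense_table decoding by two independent searches
-- (earliest NNB/VCP-count-2 index, earliest non-honorific EP token) combined by
-- comparing their indices (objective: alternative, same cost).

-- ===== PORT A =====
-- token[1] / token[0]; the `none` case of pyGet? (Python IndexError) is excluded by Pre_.
def pvIdx1 (tok : List String) : String := (PySem.List.pyGet? tok 1).getD ""
def pvIdx0 (tok : List String) : String := (PySem.List.pyGet? tok 0).getD ""

-- tense_table[i].append(x)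
def pvRowAppend (table : List (List (String ⊕ List (List String)))) (i : Nat)
    (x : String ⊕ List (List String)) : List (List (String ⊕ List (List String))) :=
  table.set i (table.getD i [] ++ [x])

def pvInit : List (List (String ⊕ List (List String))) :=
  [[Sum.inl "past"], [Sum.inl "present"], [Sum.inl "future"]]

-- the for-loop of find_tense, with `break` as early termination of the recursion
def pvFtLoop (sentence : List (List String)) (toks : List (List String))
    (tense_table : List (List (String ⊕ List (List String))))
    (special_future : Int) (is_present_flag : Bool) :
    List (List (String ⊕ List (List String))) × Bool :=
  match toks with
  | [] => (tense_table, is_present_flag)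
  | tok :: rest =>
    let sf1 := if PySem.Str.find (pvIdx1 tok) "NNB" ≠ -1 then special_future + 1 else special_future
    let sf2 := if PySem.Str.find (pvIdx1 tok) "VCP" ≠ -1 then sf1 + 1 else sf1
    if sf2 = 2 then (pvRowAppend tense_table 2 (Sum.inr sentence), false)
    else if PySem.Str.find (pvIdx1 tok) "EP" ≠ -1
        ∧ ¬ PySem.Str.find (pvIdx0 tok) "시" ≠ -1
        ∧ ¬ PySem.Str.find (pvIdx0 tok) "십" ≠ -1
        ∧ ¬ PySem.Str.find (pvIdx0 tok) "세" ≠ -1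
        ∧ ¬ PySem.Str.find (pvIdx0 tok) "실" ≠ -1
        ∧ ¬ PySem.Str.find (pvIdx0 tok) "심" ≠ -1 then
      if PySem.Str.find (pvIdx0 tok) "겠" ≠ -1 then
        (pvRowAppend tense_table 2 (Sum.inr sentence), false)
      else
        (pvRowAppend tense_table 0 (Sum.inr sentence), false)
    else pvFtLoop sentence rest tense_table sf2 is_present_flag

-- the final `if is_present_flag == True` of find_tense
def pvFinish (sentence : List (List String))
    (r : List (List (String ⊕ List (List String))) × Bool) :
    List (List (String ⊕ List (List String))) :=
  if r.2 then pvRowAppend r.1 1 (Sum.inr sentence) else r.1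

def find_tense (sentence : List (List String)) : List (List (String ⊕ List (List String))) :=
  pvFinish sentence (pvFtLoop sentence sentence pvInit 0 true)

-- the second loop of tense_to_flag over the three table rows
def pvDecode (table : List (List (String ⊕ List (List String)))) : List Int :=
  table.foldl (fun tense_flag row =>
    if row.length > 1 then
      if (PySem.List.pyGet? row 0).getD (Sum.inl "") = Sum.inl "past" then tense_flag ++ [0]
      else if (PySem.List.pyGet? row 0).getD (Sum.inl "") = Sum.inl "future" then tense_flag ++ [2]
      else tense_flag ++ [1]
    else tense_flag) []

def tense_to_flag (sentence : List (List String)) : List Int :=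
  pvDecode (find_tense sentence)

-- ===== PORT B =====
-- _first_future: enumerate with running total, early return on total == 2
def pvFirstFuture (i : Nat) (total : Int) : List (List String) → Option Nat
  | [] => none
  | tok :: rest =>
    let pos := (PySem.List.pyGet? tok 1).getD ""
    let t := total + (if PySem.Str.isIn "NNB" pos then 1 else 0)
                   + (if PySem.Str.isIn "VCP" pos then 1 else 0)
    if t = 2 then some i else pvFirstFuture (i + 1) t rest

-- _first_ep: earliest non-honorific EP token as (index, word)
def pvFirstEp (i : Nat) : List (List String) → Option (Nat × String)
  | [] => none
  | tok :: rest =>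
    let pos := (PySem.List.pyGet? tok 1).getD ""
    let word := (PySem.List.pyGet? tok 0).getD ""
    if PySem.Str.isIn "EP" pos
        ∧ ¬ (["시", "십", "세", "실", "심"].any (fun h => PySem.Str.isIn h word)) = true then
      some (i, word)
    else pvFirstEp (i + 1) rest

-- the combining if-chain of tense_to_flag
def pvCombine : Option Nat → Option (Nat × String) → List Int
  | some _, none => [2]
  | some f, some (j, w) =>
      if f ≤ j then [2] else if PySem.Str.isIn "겠" w then [2] else [0]
  | none, some (_, w) => if PySem.Str.isIn "겠" w then [2] else [0]
  | none, none => [1]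

def tense_to_flag_alt (sentence : List (List String)) : List Int :=
  pvCombine (pvFirstFuture 0 0 sentence) (pvFirstEp 0 sentence)

-- ===== PRECONDITION & SPEC =====
-- Pre_ excludes sentences containing a token with fewer than two fields, on which A's
-- `sentence[i][1]` raises IndexError; this is slightly narrower than A's domain, since A
-- still returns when the scan decides the tense before reaching such a short token
-- (B's second search then raises there).
def Pre_tense_to_flag (sentence : List (List String)) : Prop :=
  ∀ tok ∈ sentence, 2 ≤ tok.length
instance (sentence : List (List String)) : Decidable (Pre_tense_to_flag sentence) := by
  unfold Pre_tense_to_flag; infer_instance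

def pvWitness_tense_to_flag : List (List String) := [["a", "NNB"], ["b", "EP"]]

def Spec_tense_to_flag (sentence : List (List String)) (out : List Int) : Prop := out = tense_to_flag_alt sentence
instance (sentence : List (List String)) (out : List Int) : Decidable (Spec_tense_to_flag sentence out) := by unfold Spec_tense_to_flag; infer_instance

-- ===== CLAIM (what is proved, stated in full; the proofs are below) =====
def Claim_equal_tense_to_flag : Prop := ∀ (sentence : List (List String)), Dom_tense_to_flag sentence → Pre_tense_to_flag sentence → Spec_tense_to_flag sentence (tense_to_flag sentence)

-- ===== LEMMAS AND PROOFS =====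

-- glue: A's `s.find(sub) != -1` is B's `sub in s`
theorem pvFind_ne_iff (str sub : String) :
    (PySem.Str.find str sub ≠ -1) ↔ (PySem.Str.isIn sub str = true) := by
  simp [PySem.Str.find_eq, PySem.Str.isIn_eq, PySem.Chars.find_ne_neg_one_iff,
    PySem.Chars.isIn_iff_infix]

-- decoding the three possible finished tables
theorem pvDecodeFut (s : List (List String)) :
    pvDecode (pvFinish s (pvRowAppend pvInit 2 (Sum.inr s), false)) = [2] := rfl

theorem pvDecodePast (s : List (List String)) :
    pvDecode (pvFinish s (pvRowAppend pvInit 0 (Sum.inr s), false)) = [0] := rfl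

theorem pvDecodePres (s : List (List String)) :
    pvDecode (pvFinish s (pvInit, true)) = [1] := rfl

-- A's five honorific negations are B's `not any(...)`
theorem pvHonor (w : String) :
    ((¬ PySem.Str.isIn "시" w = true) ∧ (¬ PySem.Str.isIn "십" w = true) ∧
     (¬ PySem.Str.isIn "세" w = true) ∧ (¬ PySem.Str.isIn "실" w = true) ∧
     (¬ PySem.Str.isIn "심" w = true)) ↔
    ((["시", "십", "세", "실", "심"].any (fun h => PySem.Str.isIn h w)) = false) := by
  simp [Bool.not_eq_true]

-- the searches never return an index below their starting index
theorem pvFutGe : ∀ (l : List (List String)) (i : Nat) (t : Int) (j : Nat),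
    pvFirstFuture i t l = some j → i ≤ j := by
  intro l
  induction l with
  | nil => intro i t j h; simp [pvFirstFuture] at h
  | cons tok rest ih =>
    intro i t j h
    rw [pvFirstFuture] at h
    repeat' split at h
    all_goals first
      | exact (Option.some_inj.mp h) ▸ le_refl i
      | exact Nat.le_of_succ_le (ih (i + 1) _ j h)

theorem pvEpGe : ∀ (l : List (List String)) (i j : Nat) (w : String),
    pvFirstEp i l = some (j, w) → i ≤ j := by
  intro l
  induction l with
  | nil => intro i j w h; simp [pvFirstEp] at h
  | cons tok rest ih =>
    intro i j w h
    rw [pvFirstEp] at h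
    split at h
    · exact (Prod.mk.injEq _ _ _ _ ▸ Option.some_inj.mp h).1 ▸ le_refl i
    · exact Nat.le_of_succ_le (ih (i + 1) j w h)

-- when the future index is at most every candidate EP index, the future search wins
theorem pvCombineFut (i : Nat) (e : Option (Nat × String))
    (h : ∀ j w, e = some (j, w) → i ≤ j) :
    pvCombine (some i) e = [2] := by
  cases e with
  | none => rfl
  | some p =>
    cases p with
    | mk j w => simp [pvCombine, h j w rfl]

-- when the EP token comes strictly before any future index, the EP token decides
theorem pvCombineEp (i : Nat) (w : String) (f : Option Nat)
    (h : ∀ j, f = some j → i < j) :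
    pvCombine f (some (i, w)) = (if PySem.Str.isIn "겠" w then [2] else [0]) := by
  cases f with
  | none => rfl
  | some j => simp [pvCombine, Nat.not_le.mpr (h j rfl)]

-- main invariant: decoding A's finished table equals combining B's two searches,
-- for any suffix, running counter and position
theorem pvMain (s : List (List String)) :
    ∀ (toks : List (List String)) (i : Nat) (sf : Int),
      pvDecode (pvFinish s (pvFtLoop s toks pvInit sf true)) =
        pvCombine (pvFirstFuture i sf toks) (pvFirstEp i toks) := by
  intro toks
  induction toks with
  | nil => intro i sf; exact pvDecodePres s
  | cons tok rest ih =>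
    intro i sf
    rw [pvFtLoop, pvFirstFuture, pvFirstEp]
    simp only [pvFind_ne_iff, pvIdx1, pvIdx0]
    set pos := (PySem.List.pyGet? tok 1).getD "" with hpos
    set word := (PySem.List.pyGet? tok 0).getD "" with hword
    have hT : (if PySem.Str.isIn "VCP" pos = true then
          (if PySem.Str.isIn "NNB" pos = true then sf + 1 else sf) + 1
        else (if PySem.Str.isIn "NNB" pos = true then sf + 1 else sf)) =
        sf + (if PySem.Str.isIn "NNB" pos = true then 1 else 0)
           + (if PySem.Str.isIn "VCP" pos = true then 1 else 0) := by
      split_ifs <;> ring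
    rw [hT]
    by_cases h2 : sf + (if PySem.Str.isIn "NNB" pos = true then (1:Int) else 0)
           + (if PySem.Str.isIn "VCP" pos = true then 1 else 0) = 2
    · rw [if_pos h2, if_pos h2]
      refine (pvDecodeFut s).trans (pvCombineFut i _ ?_).symm
      intro j w hjw
      split at hjw
      · exact (Prod.mk.injEq _ _ _ _ ▸ Option.some_inj.mp hjw).1 ▸ le_refl i
      · exact Nat.le_of_succ_le (pvEpGe rest (i + 1) j w hjw)
    · rw [if_neg h2, if_neg h2]
      by_cases hEP : PySem.Str.isIn "EP" pos = true
      · by_cases hH : (["시", "십", "세", "실", "심"].any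
            (fun h => PySem.Str.isIn h word)) = false
        · have hAcond : PySem.Str.isIn "EP" pos = true
              ∧ ¬ PySem.Str.isIn "시" word = true
              ∧ ¬ PySem.Str.isIn "십" word = true
              ∧ ¬ PySem.Str.isIn "세" word = true
              ∧ ¬ PySem.Str.isIn "실" word = true
              ∧ ¬ PySem.Str.isIn "심" word = true :=
            ⟨hEP, (pvHonor word).mpr hH⟩
          have hBcond : PySem.Str.isIn "EP" pos = true
              ∧ ¬ (["시", "십", "세", "실", "심"].any
                    (fun h => PySem.Str.isIn h word)) = true :=
            ⟨hEP, fun h => Bool.false_ne_true (hH ▸ h)⟩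
          rw [if_pos hAcond, if_pos hBcond]
          rw [pvCombineEp i word (pvFirstFuture (i + 1) _ rest)
            (fun j hj => Nat.lt_of_succ_le (pvFutGe rest (i + 1) _ j hj))]
          by_cases hG : PySem.Str.isIn "겠" word = true
          · rw [if_pos hG, if_pos hG]; exact pvDecodeFut s
          · rw [if_neg hG, if_neg hG]; exact pvDecodePast s
        · have hT2 : (["시", "십", "세", "실", "심"].any
              (fun h => PySem.Str.isIn h word)) = true := Bool.ne_false_iff.mp hH
          have hAcond : ¬ (PySem.Str.isIn "EP" pos = true
              ∧ ¬ PySem.Str.isIn "시" word = true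
              ∧ ¬ PySem.Str.isIn "십" word = true
              ∧ ¬ PySem.Str.isIn "세" word = true
              ∧ ¬ PySem.Str.isIn "실" word = true
              ∧ ¬ PySem.Str.isIn "심" word = true) :=
            fun hc => hH ((pvHonor word).mp hc.2)
          have hBcond : ¬ (PySem.Str.isIn "EP" pos = true
              ∧ ¬ (["시", "십", "세", "실", "심"].any
                    (fun h => PySem.Str.isIn h word)) = true) :=
            fun hn => hn.2 hT2
          rw [if_neg hAcond, if_neg hBcond]
          exact ih (i + 1) _
      · have hAcond : ¬ (PySem.Str.isIn "EP" pos = true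
              ∧ ¬ PySem.Str.isIn "시" word = true
              ∧ ¬ PySem.Str.isIn "십" word = true
              ∧ ¬ PySem.Str.isIn "세" word = true
              ∧ ¬ PySem.Str.isIn "실" word = true
              ∧ ¬ PySem.Str.isIn "심" word = true) := fun hc => hEP hc.1
        have hBcond : ¬ (PySem.Str.isIn "EP" pos = true
              ∧ ¬ (["시", "십", "세", "실", "심"].any
                    (fun h => PySem.Str.isIn h word)) = true) := fun hc => hEP hc.1
        rw [if_neg hAcond, if_neg hBcond]
        exact ih (i + 1) _

-- ===== VERDICT (by name: the statement is the Claim_ definition above) =====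
theorem tense_to_flag_spec : Claim_equal_tense_to_flag := by
  intro sentence _ _
  unfold Spec_tense_to_flag tense_to_flag find_tense tense_to_flag_alt
  exact pvMain sentence sentence 0 0
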